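-- pv_equiv track=rewrite | github.com/cykim1228/Programmers | 프로그래머스/unrated/181918. 배열 만들기 4/배열 만들기 4.py | solution
-- ===== SOURCE A (Python) =====
-- def solution(arr):
--     stk = []
--     i = 0
--
--     while i < len(arr) :
--         if stk == [] :
--             stk.append(arr[i])
--             i = i + 1
--         elif stk[len(stk) - 1] < arr[i] :
--             stk.append(arr[i])
--             i = i + 1
--         elif stk[len(stk) - 1] >= arr[i] :
--             stk.remove(stk[len(stk) - 1])
--
--     return stk
-- ===== SOURCE B (Python) =====
-- def solution(arr):
--     res = []
--     cur_min = None
--     for x in reversed(arr):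
--         if cur_min is None or x < cur_min:
--             res.append(x)
--             cur_min = x
--     return res[::-1]
-- ===== Notes on version B (the rewrite author's own statement) =====
-- stated objective: faster
-- what changed: Replaced the O(n^2) stack simulation (re-scanning with list.remove and a non-advancing index) by a single right-to-left running-minimum pass: an element survives iff it is strictly below every element to its right.
import Mathlib
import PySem

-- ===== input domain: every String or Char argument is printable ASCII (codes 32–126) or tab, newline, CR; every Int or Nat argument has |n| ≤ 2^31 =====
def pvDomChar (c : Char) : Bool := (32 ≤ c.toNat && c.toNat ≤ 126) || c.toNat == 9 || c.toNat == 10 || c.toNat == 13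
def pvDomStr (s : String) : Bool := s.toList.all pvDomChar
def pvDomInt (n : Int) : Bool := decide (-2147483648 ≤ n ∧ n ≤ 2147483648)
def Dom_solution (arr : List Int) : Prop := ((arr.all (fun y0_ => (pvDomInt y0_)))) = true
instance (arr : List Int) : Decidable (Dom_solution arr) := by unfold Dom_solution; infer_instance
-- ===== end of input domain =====

-- B replaces A's O(n^2) stack simulation by a single right-to-left running-minimum pass (faster: asymptotic, measured).


-- ===== PORT A =====
-- helper fact cited by the loop's termination proof
lemma getLastD_mem (l : List Int) (h : l ≠ []) : l.getLastD 0 ∈ l := by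
  cases l with
  | nil => exact absurd rfl h
  | cons a t =>
    rw [List.getLastD_eq_getLast?, List.getLast?_eq_some_getLast (by simp), Option.getD_some]
    exact List.getLast_mem _

-- the while loop; `stk[len(stk)-1]` = getLastD (stack nonempty in those branches),
-- `stk.remove(stk[len(stk)-1])` = List.erase of that value (Python removes the first
-- occurrence; the value is present, so no ValueError).
def solLoop (arr : List Int) (stk : List Int) (i : Nat) : List Int :=
  if h : i < arr.length then
    if stk = [] then
      solLoop arr (stk ++ [arr[i]]) (i + 1)
    else if stk.getLastD 0 < arr[i] then
      solLoop arr (stk ++ [arr[i]]) (i + 1)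
    else if stk.getLastD 0 ≥ arr[i] then
      solLoop arr (stk.erase (stk.getLastD 0)) i
    else
      stk  -- unreachable: the two elif conditions are exhaustive
  else
    stk
termination_by 2 * (arr.length - i) + stk.length
decreasing_by
  · simp; omega
  · simp; omega
  · have hne : stk ≠ [] := by assumption
    have hmem : stk.getLastD 0 ∈ stk := getLastD_mem stk hne
    have := List.length_erase_of_mem hmem
    have : (stk.erase (stk.getLastD 0)).length < stk.length := by
      rw [this]; cases stk with
      | nil => exact absurd rfl hne
      | cons a l => simp
    omega

def solution (arr : List Int) : List Int := solLoop arr [] 0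

-- ===== PORT B =====
-- single pass over reversed(arr) keeping the running minimum; res[::-1] at the end
def solution_alt (arr : List Int) : List Int :=
  (arr.reverse.foldl
    (fun st x =>
      match st with
      | (none, res) => (some x, res ++ [x])
      | (some c, res) => if x < c then (some x, res ++ [x]) else (some c, res))
    ((none : Option Int), ([] : List Int))).2.reverse

-- ===== PRECONDITION & SPEC =====
def Spec_solution (arr : List Int) (out : List Int) : Prop := out = solution_alt arr
instance (arr : List Int) (out : List Int) : Decidable (Spec_solution arr out) := by unfold Spec_solution; infer_instance

-- ===== CLAIM (what is proved, stated in full; the proofs are below) =====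
def Claim_equal_solution : Prop := ∀ (arr : List Int), Dom_solution arr → Spec_solution arr (solution arr)

-- ===== LEMMAS AND PROOFS =====

-- A's stack with top at the HEAD: pop while top ≥ x, then push x
def popPush (r : List Int) (x : Int) : List Int := x :: r.dropWhile (fun t => x ≤ t)

-- B's kept elements (input = reversed arr, output in reversed order), min threaded as Option
def suf : List Int → Option Int → List Int
  | [], _ => []
  | x :: xs, none => x :: suf xs (some x)
  | x :: xs, some c => if x < c then x :: suf xs (some x) else suf xs (some c)

lemma suf_some_eq_dropWhile : ∀ (l : List Int) (x : Int) (m : Option Int),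
    (∀ z, m = some z → x ≤ z) →
    suf l (some x) = (suf l m).dropWhile (fun t => x ≤ t) := by
  intro l
  induction l with
  | nil => intro x m _; cases m <;> simp [suf]
  | cons y ys ih =>
    intro x m hm
    cases m with
    | none =>
      by_cases hyx : y < x
      · simp [suf, hyx, List.dropWhile, not_le.mpr hyx]
      · simp only [suf, if_neg hyx]
        simp [List.dropWhile, not_lt.mp hyx]
        exact ih x (some y) (by intro z hz; cases hz; exact not_lt.mp hyx)
    | some c =>
      have hxc : x ≤ c := hm c rfl
      by_cases hyc : y < c
      · by_cases hyx : y < x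
        · simp [suf, hyx, hyc, List.dropWhile, not_le.mpr hyx]
        · simp only [suf, if_neg hyx, if_pos hyc]
          simp [List.dropWhile, not_lt.mp hyx]
          exact ih x (some y) (by intro z hz; cases hz; exact not_lt.mp hyx)
      · have hyx : ¬ y < x := fun h => hyc (lt_of_lt_of_le h hxc)
        simp only [suf, if_neg hyx, if_neg hyc]
        exact ih x (some c) (by intro z hz; cases hz; exact hxc)

lemma foldl_popPush_eq_suf : ∀ (l : List Int),
    List.foldl popPush [] l = suf l.reverse none := by
  intro l
  induction l using List.reverseRecOn with
  | nil => simp [suf]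
  | append_singleton l x ih =>
    rw [List.foldl_append]
    simp only [List.foldl_cons, List.foldl_nil, List.reverse_append, List.reverse_singleton,
      List.singleton_append, suf]
    rw [ih, popPush, suf_some_eq_dropWhile l.reverse x none (by intro z h; cases h)]

-- the loop lemma: A's while loop computes the popPush fold (stack reversed to head-is-top)
lemma solLoop_eq_foldl : ∀ (n : Nat) (arr : List Int) (i : Nat) (r : List Int),
    2 * (arr.length - i) + r.length ≤ n → List.IsChain (· > ·) r →
    solLoop arr r.reverse i = (List.foldl popPush r (arr.drop i)).reverse := by
  intro n
  induction n with
  | zero =>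
    intro arr i r hn hch
    have hi : ¬ i < arr.length := by omega
    have hr : r = [] := by cases r <;> simp_all
    rw [solLoop, dif_neg hi, List.drop_eq_nil_of_le (by omega)]
    simp [hr]
  | succ n ih =>
    intro arr i r hn hch
    by_cases hi : i < arr.length
    · have hdrop : arr.drop i = arr[i] :: arr.drop (i + 1) :=
        List.drop_eq_getElem_cons hi
      cases r with
      | nil =>
        rw [solLoop, dif_pos hi]
        simp only [List.reverse_nil, if_pos rfl, List.nil_append]
        have : [arr[i]] = ([arr[i]] : List Int).reverse := by simp
        rw [this, ih arr (i + 1) [arr[i]] (by simp; omega) (List.IsChain.singleton _)]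
        rw [hdrop, List.foldl_cons]
        rfl
      | cons t r' =>
        have hne : (t :: r').reverse ≠ [] := by simp
        have hlast : ((t :: r').reverse).getLastD 0 = t := by
          simp [List.getLastD_eq_getLast?, List.getLast?_reverse]
        rw [solLoop, dif_pos hi, if_neg hne, hlast]
        by_cases hlt : t < arr[i]
        · rw [if_pos hlt]
          have hrw : (t :: r').reverse ++ [arr[i]] = (arr[i] :: t :: r').reverse := by simp
          rw [hrw, ih arr (i + 1) (arr[i] :: t :: r') (by simp at hn ⊢; omega)
            (List.IsChain.cons_cons hlt hch)]
          rw [hdrop]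
          simp only [List.foldl_cons]
          congr 2
          simp [popPush, List.dropWhile, not_le.mpr hlt]
        · rw [if_neg hlt, if_pos (not_lt.mp hlt)]
          have hpair : List.Pairwise (· > ·) (t :: r') :=
            (List.isChain_iff_pairwise).mp hch
          have hnotmem : t ∉ r'.reverse := by
            simp only [List.mem_reverse]
            intro hm
            exact absurd ((List.pairwise_cons.mp hpair).1 t hm) (lt_irrefl t)
          have herase : ((t :: r').reverse).erase t = r'.reverse := by
            have : (t :: r').reverse = r'.reverse ++ [t] := by simp
            rw [this, List.erase_append_right _ hnotmem]
            simp
          rw [herase, ih arr i r' (by simp at hn ⊢; omega) (List.isChain_cons.mp hch).2]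
          rw [hdrop]
          simp only [List.foldl_cons]
          congr 2
          simp [popPush, List.dropWhile, not_lt.mp hlt]
    · rw [solLoop, dif_neg hi, List.drop_eq_nil_of_le (by omega)]
      simp
  termination_by n

-- B's fold accumulates exactly `suf`
lemma foldl_step_eq_suf : ∀ (l : List Int) (m : Option Int) (acc : List Int),
    (List.foldl
      (fun st x =>
        match st with
        | (none, res) => (some x, res ++ [x])
        | (some c, res) => if x < c then (some x, res ++ [x]) else (some c, res))
      (m, acc) l).2 = acc ++ suf l m := by
  intro l
  induction l with
  | nil => intro m acc; cases m <;> simp [suf]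
  | cons x xs ih =>
    intro m acc
    cases m with
    | none => simp only [List.foldl_cons, suf]; rw [ih]; simp
    | some c =>
      by_cases hx : x < c
      · simp only [List.foldl_cons, if_pos hx, suf, if_pos hx]; rw [ih]; simp
      · simp only [List.foldl_cons, if_neg hx, suf, if_neg hx]; rw [ih]

-- ===== VERDICT (by name: the statement is the Claim_ definition above) =====
theorem solution_spec : Claim_equal_solution := by
  intro arr _
  unfold Spec_solution solution solution_alt
  have hA : solLoop arr [] 0 = (List.foldl popPush [] arr).reverse := by
    simpa using solLoop_eq_foldl (2 * arr.length) arr 0 [] (by simp) (by simp)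
  rw [hA, foldl_popPush_eq_suf, foldl_step_eq_suf]
  simp
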